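-- pv_equiv track=rewrite | github.com/xianyuerrr/day-day-up-c2_Plus | LeetCode/日常刷题/2401-2600/2530. 执行 K 次操作后的最大分数.py | maxKelements
-- ===== SOURCE A (Python) =====
-- import heapq
-- from typing import List
--
-- def maxKelements(nums: List[int], k: int) -> int:
--     res = 0
--     nums = [-val for val in nums]
--     heapq.heapify(nums)
--     while k:
--         k -= 1
--         val = heapq.heappop(nums)
--         res -= val
--         heapq.heappush(nums, val // 3)
--     return res
-- ===== SOURCE B (Python) =====
-- def maxKelements(nums, k):
--     res = 0
--     vals = [-v for v in nums]
--     while k: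
--         k -= 1
--         m = min(vals)
--         res -= m
--         vals[vals.index(m)] = m // 3
--     return res
-- ===== Notes on version B (the rewrite author's own statement) =====
-- stated objective: simpler
-- what changed: Replaces the binary heap (heapify/heappop/heappush) with a plain repeated min-scan over a negated copy: each round takes min(vals) and overwrites its first occurrence with m // 3; no heap structure, no mutation of the caller's list.
import Mathlib
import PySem

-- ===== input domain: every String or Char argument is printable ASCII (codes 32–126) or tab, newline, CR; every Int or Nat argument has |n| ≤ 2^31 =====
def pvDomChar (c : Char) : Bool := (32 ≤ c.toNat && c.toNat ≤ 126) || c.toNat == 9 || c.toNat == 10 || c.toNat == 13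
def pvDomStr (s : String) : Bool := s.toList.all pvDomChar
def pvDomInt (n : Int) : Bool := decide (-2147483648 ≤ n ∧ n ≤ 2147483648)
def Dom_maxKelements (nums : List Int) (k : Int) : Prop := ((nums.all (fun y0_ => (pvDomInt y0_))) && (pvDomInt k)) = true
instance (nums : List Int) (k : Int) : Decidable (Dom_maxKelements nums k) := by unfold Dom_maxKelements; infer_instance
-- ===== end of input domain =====

-- B replaces A's binary heap with a plain repeated min-scan (simpler, no heap, no in-place
-- mutation of the caller's list); equivalence is about the return value only (A mutates its
-- local negated copy, not the caller's list, so no observable side effect differs).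

-- ===== PORT A =====
-- hget l i = heap[i] for an index we access only in range (Python would raise otherwise)
def hget (l : List Int) (i : Nat) : Int := l.getD i 0

-- heapq._siftdown's while-loop (exact: moves parents down while newitem < parent)
def siftdownLoop (l : List Int) (startpos pos : Nat) (newitem : Int) : List Int × Nat :=
  if _h : startpos < pos then
    let parentpos := (pos - 1) / 2
    let parent := hget l parentpos
    if newitem < parent then
      siftdownLoop (l.set pos parent) startpos parentpos newitem
    else (l, pos)
  else (l, pos)
termination_by pos
decreasing_by omega

-- heapq._siftdown: read newitem, run the loop, write newitem at the final position
def siftdown (l : List Int) (startpos pos : Nat) : List Int :=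
  let newitem := hget l pos
  let r := siftdownLoop l startpos pos newitem
  r.1.set r.2 newitem

-- heapq._siftup's while-loop (exact: bubble the smaller child up until a leaf)
def siftupLoop (l : List Int) (pos endpos : Nat) : List Int × Nat :=
  if _h : 2 * pos + 1 < endpos then
    let childpos := if 2 * pos + 2 < endpos ∧ ¬ (hget l (2 * pos + 1) < hget l (2 * pos + 2))
                    then 2 * pos + 2 else 2 * pos + 1
    siftupLoop (l.set pos (hget l childpos)) childpos endpos
  else (l, pos)
termination_by endpos - pos
decreasing_by split <;> omega

-- heapq._siftup: loop to a leaf, write newitem there, then _siftdown back up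
def siftup (l : List Int) (pos : Nat) : List Int :=
  let endpos := l.length
  let startpos := pos
  let newitem := hget l pos
  let r := siftupLoop l pos endpos
  siftdown (r.1.set r.2 newitem) startpos r.2

-- heapq.heapify: for i in reversed(range(n//2)): _siftup(heap, i)
def heapify (l : List Int) : List Int :=
  (List.range (l.length / 2)).reverse.foldl (fun a i => siftup a i) l

-- heapq.heappop (on [] Python raises IndexError; excluded by Pre_)
def heappop (l : List Int) : Int × List Int :=
  let lastelt := hget l (l.length - 1)
  let rest := l.dropLast
  if rest.length ≠ 0 then
    let returnitem := hget rest 0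
    let rest2 := rest.set 0 lastelt
    (returnitem, siftup rest2 0)
  else (lastelt, rest)

-- heapq.heappush
def heappush (l : List Int) (item : Int) : List Int :=
  let l2 := l ++ [item]
  siftdown l2 0 (l2.length - 1)

-- A's `while k: k -= 1; …` — fuel k.toNat (Python diverges for k < 0; excluded by Pre_)
def loopA (h : List Int) (res : Int) (fuel : Nat) : Int :=
  match fuel with
  | 0 => res
  | fuel + 1 =>
    let r := heappop h
    loopA (heappush r.2 (PySem.Int.floordiv r.1 3)) (res - r.1) fuel

def maxKelements (nums : List Int) (k : Int) : Int :=
  loopA (heapify (nums.map (fun v => -v))) 0 k.toNat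

-- ===== PORT B =====
-- B: negated copy, then k rounds of: m = min(vals); res -= m; vals[vals.index(m)] = m // 3
def loopB (vals : List Int) (res : Int) (fuel : Nat) : Int :=
  match fuel with
  | 0 => res
  | fuel + 1 =>
    match PySem.List.min? vals (fun x => x) with
    | none => res  -- Python: min([]) raises ValueError; excluded by Pre_
    | some m =>
      loopB (vals.set ((PySem.List.index? vals m).getD 0) (PySem.Int.floordiv m 3)) (res - m) fuel

def maxKelements_alt (nums : List Int) (k : Int) : Int :=
  loopB (nums.map (fun v => -v)) 0 k.toNat

-- ===== PRECONDITION & SPEC =====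
-- Pre_ excludes only inputs where A does not return: k < 0 (A's `while k` loops forever)
-- and nums = [] with k ≠ 0 (heappop raises IndexError); B raises/diverges there too.
def Pre_maxKelements (nums : List Int) (k : Int) : Prop := 0 ≤ k ∧ (nums ≠ [] ∨ k = 0)
instance (nums : List Int) (k : Int) : Decidable (Pre_maxKelements nums k) := by
  unfold Pre_maxKelements; infer_instance

def pvWitness_maxKelements : List Int × Int := ([1, 10, 3, 3, 3], 3)

def Spec_maxKelements (nums : List Int) (k : Int) (out : Int) : Prop := out = maxKelements_alt nums k
instance (nums : List Int) (k : Int) (out : Int) : Decidable (Spec_maxKelements nums k out) := by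
  unfold Spec_maxKelements; infer_instance

-- ===== CLAIM (what is proved, stated in full; the proofs are below) =====
def Claim_equal_maxKelements : Prop := ∀ (nums : List Int) (k : Int), Dom_maxKelements nums k → Pre_maxKelements nums k → Spec_maxKelements nums k (maxKelements nums k)

-- ===== LEMMAS AND PROOFS =====

-- `anc s p`: s lies on the parent chain of p (p, (p-1)/2, …, 0)
def anc (s p : Nat) : Bool :=
  if p ≤ s then p == s else anc s ((p - 1) / 2)
termination_by p
decreasing_by omega

-- the binary-min-heap order on all parent→child edges whose parent index is ≥ s
def HeapFrom (l : List Int) (s : Nat) : Prop :=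
  ∀ c, 0 < c → c < l.length → s ≤ (c - 1) / 2 → hget l ((c - 1) / 2) ≤ hget l c

lemma anc_self (s : Nat) : anc s s = true := by
  rw [anc]; simp

lemma anc_le {s p : Nat} (h : anc s p = true) : s ≤ p := by
  by_contra hc
  rw [anc] at h
  simp only [if_pos (by omega : p ≤ s), beq_iff_eq] at h
  omega

lemma anc_parent {s p : Nat} (hsp : s < p) (h : anc s p = true) : anc s ((p - 1) / 2) = true := by
  rw [anc] at h
  simpa [if_neg (by omega : ¬ p ≤ s)] using h

lemma anc_zero (p : Nat) : anc 0 p = true := by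
  induction p using Nat.strong_induction_on with
  | _ p ih =>
    rw [anc]
    by_cases h : p ≤ 0
    · simp [h]; omega
    · simp only [if_neg h]
      exact ih _ (by omega)

lemma anc_child {s p c : Nat} (h : anc s p = true) (hc : c = 2 * p + 1 ∨ c = 2 * p + 2) :
    anc s c = true := by
  have hl := anc_le h
  rw [anc]
  have h1 : ¬ c ≤ s := by omega
  have h2 : (c - 1) / 2 = p := by omega
  simp [h1, h2, h]

lemma hget_set_self {l : List Int} {i : Nat} {v : Int} (h : i < l.length) :
    hget (l.set i v) i = v := by
  simp [hget, List.getD, h]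

lemma hget_set_ne {l : List Int} {i j : Nat} {v : Int} (h : j ≠ i) :
    hget (l.set i v) j = hget l j := by
  simp [hget, List.getD, List.getElem?_set_ne (by omega : i ≠ j)]

lemma set_hget_self {l : List Int} {i : Nat} (h : i < l.length) :
    l.set i (hget l i) = l := by
  have : hget l i = l[i] := by simp [hget, List.getD, List.getElem?_eq_getElem h]
  rw [this, List.set_getElem_self]

lemma hget_eq_getElem {l : List Int} {i : Nat} (h : i < l.length) : hget l i = l[i] := by
  simp [hget, List.getD, List.getElem?_eq_getElem h]

lemma hget_dropLast {l : List Int} {i : Nat} (h : i < l.length - 1) :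
    hget l.dropLast i = hget l i := by
  rw [hget_eq_getElem (by simpa using h), hget_eq_getElem (by omega)]
  simp

lemma hget_append_left {l t : List Int} {i : Nat} (h : i < l.length) :
    hget (l ++ t) i = hget l i := by
  rw [hget_eq_getElem (by simp; omega), hget_eq_getElem h]
  exact List.getElem_append_left h

lemma hget_concat_self (l : List Int) (x : Int) : hget (l ++ [x]) l.length = x := by
  rw [hget_eq_getElem (by simp)]
  simp

lemma mem_of_hget {l : List Int} {i : Nat} (h : i < l.length) : hget l i ∈ l := by
  rw [hget_eq_getElem h]; exact List.getElem_mem h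

-- multiset bookkeeping for a single in-range overwrite
lemma ms_set {l : List Int} {i : Nat} (h : i < l.length) (v : Int) :
    (↑(l.set i v) : Multiset Int) + {hget l i} = ↑l + {v} := by
  induction l generalizing i with
  | nil => simp at h
  | cons a t ih =>
    cases i with
    | zero =>
      simp only [List.set, hget, List.getD_cons_zero]
      rw [← Multiset.cons_coe, ← Multiset.cons_coe, ← Multiset.singleton_add,
        ← Multiset.singleton_add]
      rw [add_comm ({v} : Multiset Int), add_assoc, add_comm ({a} : Multiset Int), add_assoc,
        add_comm ({v} : Multiset Int) ({a} : Multiset Int)]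
    | succ n =>
      have hg : hget (a :: t) (n + 1) = hget t n := by simp [hget]
      simp only [List.set, hg]
      rw [← Multiset.cons_coe, ← Multiset.cons_coe, ← Multiset.singleton_add,
        ← Multiset.singleton_add, add_assoc, add_assoc, ih (by simpa using Nat.lt_of_succ_lt_succ h)]

lemma perm_set_set {l : List Int} {p pp : Nat} (hp : p < l.length) (hpp : pp < l.length)
    (hne : pp ≠ p) (x : Int) :
    ((l.set p (hget l pp)).set pp x).Perm (l.set p x) := by
  rw [← Multiset.coe_eq_coe]
  have h1 := ms_set (l := l.set p (hget l pp)) (i := pp) (by simpa using hpp) x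
  rw [hget_set_ne hne] at h1
  have h2 := ms_set (l := l) (i := p) hp (hget l pp)
  have h3 := ms_set (l := l) (i := p) hp x
  have hc : (↑((l.set p (hget l pp)).set pp x) : Multiset Int) + ({hget l pp} + {hget l p})
      = ↑(l.set p x) + ({hget l pp} + {hget l p}) := by
    calc (↑((l.set p (hget l pp)).set pp x) : Multiset Int) + ({hget l pp} + {hget l p})
        = (↑((l.set p (hget l pp)).set pp x) + {hget l pp}) + {hget l p} := by
          rw [add_assoc]
      _ = (↑(l.set p (hget l pp)) + {x}) + {hget l p} := by rw [h1]
      _ = (↑(l.set p (hget l pp)) + {hget l p}) + {x} := by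
          rw [add_assoc, add_assoc, add_comm ({x} : Multiset Int)]
      _ = (↑l + {hget l pp}) + {x} := by rw [h2]
      _ = (↑l + {x}) + {hget l pp} := by
          rw [add_assoc, add_assoc, add_comm ({hget l pp} : Multiset Int)]
      _ = (↑(l.set p x) + {hget l p}) + {hget l pp} := by rw [h3]
      _ = ↑(l.set p x) + ({hget l pp} + {hget l p}) := by
          rw [add_assoc, add_comm ({hget l p} : Multiset Int)]
  exact add_right_cancel hc

-- siftdownLoop, then writing newitem at the final hole, permutes l.set p x
lemma sdl_perm (s : Nat) (x : Int) :
    ∀ p l, p < l.length →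
      (((siftdownLoop l s p x).1.set (siftdownLoop l s p x).2 x).Perm (l.set p x)) := by
  intro p
  induction p using Nat.strong_induction_on with
  | _ p ih =>
    intro l hp
    rw [siftdownLoop]
    by_cases h1 : s < p
    · simp only [dif_pos h1]
      by_cases h2 : x < hget l ((p - 1) / 2)
      · simp only [if_pos h2]
        refine ((ih ((p - 1) / 2) (by omega) _ (by simpa using (by omega : (p - 1) / 2 < l.length))).trans ?_)
        exact perm_set_set hp (by omega) (by omega) x
      · simp only [if_neg h2]
        exact List.Perm.refl _
    · simp only [dif_neg h1]
      exact List.Perm.refl _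

-- the sift-up (decrease-key) correctness of heapq._siftdown
lemma sdl_heap (s : Nat) (x : Int) :
    ∀ p l, p < l.length → anc s p = true →
      (∀ c, 0 < c → c < l.length → s ≤ (c - 1) / 2 → c ≠ p →
        hget (l.set p x) ((c - 1) / 2) ≤ hget (l.set p x) c) →
      (s < p → ∀ c, c < l.length → (c = 2 * p + 1 ∨ c = 2 * p + 2) →
        hget (l.set p x) ((p - 1) / 2) ≤ hget (l.set p x) c) →
      HeapFrom ((siftdownLoop l s p x).1.set (siftdownLoop l s p x).2 x) s := by
  intro p
  induction p using Nat.strong_induction_on with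
  | _ p ih =>
    intro l hp ha Hi Hii
    have hsp := anc_le ha
    rw [siftdownLoop]
    by_cases h1 : s < p
    · simp only [dif_pos h1]
      by_cases h2 : x < hget l ((p - 1) / 2)
      · simp only [if_pos h2]
        have hppp : (p - 1) / 2 < p := by omega
        have hppl : (p - 1) / 2 < l.length := by omega
        refine ih ((p - 1) / 2) hppp _ (by simpa using hppl) (anc_parent h1 ha) ?_ ?_
        · -- edges except into (p-1)/2 hold after the swap
          intro c h0 hc hsc hcp
          rw [List.length_set] at hc
          by_cases hcpeq : c = p
          · -- edge (p-1)/2 → p : x ≤ parent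
            rw [hcpeq] at hsc ⊢
            rw [hget_set_self (by simpa using hppl), hget_set_ne (by omega : p ≠ (p - 1) / 2),
              hget_set_self hp]
            omega
          · by_cases hqp : (c - 1) / 2 = p
            · -- c is a child of p: parent ≤ m[c], from Hii
              have hcc : c = 2 * p + 1 ∨ c = 2 * p + 2 := by omega
              have hne1 : c ≠ (p - 1) / 2 := by omega
              rw [hqp, hget_set_ne (by omega : p ≠ (p - 1) / 2), hget_set_self hp,
                hget_set_ne hne1, hget_set_ne hcpeq]
              have h3 := Hii h1 c hc hcc
              rw [hget_set_ne (by omega : (p - 1) / 2 ≠ p), hget_set_ne hcpeq] at h3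
              exact h3
            · by_cases hqpp : (c - 1) / 2 = (p - 1) / 2
              · -- c ≠ p is a child of (p-1)/2 : x ≤ l[c]
                rw [hqpp, hget_set_self (by simpa using hppl), hget_set_ne hcp,
                  hget_set_ne hcpeq]
                have h3 := Hi c h0 hc hsc hcpeq
                rw [hqpp, hget_set_ne (by omega : (p - 1) / 2 ≠ p), hget_set_ne hcpeq] at h3
                omega
              · -- edge untouched by the swap
                have h3 := Hi c h0 hc hsc hcpeq
                rw [hget_set_ne hqp, hget_set_ne hcpeq] at h3
                rw [hget_set_ne hqpp, hget_set_ne hcp, hget_set_ne hqp, hget_set_ne hcpeq]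
                exact h3
        · -- children of (p-1)/2 are ≥ its parent
          intro hspp c hc hcc
          rw [List.length_set] at hc
          have h0pp : 0 < (p - 1) / 2 := by omega
          have hgpnePP : ((p - 1) / 2 - 1) / 2 ≠ (p - 1) / 2 := by omega
          have hgpX : ((p - 1) / 2 - 1) / 2 ≠ p := by omega
          have hsgp : s ≤ ((p - 1) / 2 - 1) / 2 := anc_le (anc_parent hspp (anc_parent h1 ha))
          have edge1 := Hi ((p - 1) / 2) (by omega) hppl hsgp (by omega)
          rw [hget_set_ne hgpX, hget_set_ne (by omega : (p - 1) / 2 ≠ p)] at edge1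
          rw [hget_set_ne hgpnePP, hget_set_ne hgpX]
          by_cases hcp2 : c = p
          · rw [hcp2, hget_set_ne (by omega : p ≠ (p - 1) / 2), hget_set_self hp]
            exact edge1
          · have hcnepp : c ≠ (p - 1) / 2 := by omega
            rw [hget_set_ne hcnepp, hget_set_ne hcp2]
            have edge2 := Hi c (by omega) hc (by omega) hcp2
            rw [hget_set_ne (by omega : (c - 1) / 2 ≠ p), hget_set_ne hcp2,
              (by omega : (c - 1) / 2 = (p - 1) / 2)] at edge2
            omega
      · -- loop stops: parent ≤ x already
        simp only [if_neg h2]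
        intro c h0 hc hsc
        rw [List.length_set] at hc
        by_cases hcp : c = p
        · rw [hcp, hget_set_ne (by omega : (p - 1) / 2 ≠ p), hget_set_self hp]
          omega
        · exact Hi c h0 hc hsc hcp
    · -- pos = startpos
      simp only [dif_neg h1]
      have hps : p = s := by omega
      intro c h0 hc hsc
      rw [List.length_set] at hc
      by_cases hcp : c = p
      · omega
      · exact Hi c h0 hc hsc hcp

lemma sul_len : ∀ p l e, (siftupLoop l p e).1.length = l.length := by
  intro p l e
  fun_induction siftupLoop l p e <;> simp_all

lemma sul_perm (x : Int) :
    ∀ p l e, p < e → e ≤ l.length →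
      (((siftupLoop l p e).1.set (siftupLoop l p e).2 x).Perm (l.set p x)) := by
  suffices key : ∀ n p l e, e - p ≤ n → p < e → e ≤ l.length →
      (((siftupLoop l p e).1.set (siftupLoop l p e).2 x).Perm (l.set p x)) by
    intro p l e hp he; exact key (e - p) p l e le_rfl hp he
  intro n
  induction n with
  | zero => intro p l e h1 h2 h3; omega
  | succ n ih =>
    intro p l e h1 h2 h3
    rw [siftupLoop]
    by_cases hg : 2 * p + 1 < e
    · simp only [dif_pos hg]
      by_cases hc : 2 * p + 2 < e ∧ ¬ (hget l (2 * p + 1) < hget l (2 * p + 2))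
      · simp only [if_pos hc]
        refine (ih (2 * p + 2) _ e (by omega) (by omega) (by simpa using h3)).trans ?_
        exact perm_set_set (by omega) (by omega) (by omega) x
      · simp only [if_neg hc]
        refine (ih (2 * p + 1) _ e (by omega) (by omega) (by simpa using h3)).trans ?_
        exact perm_set_set (by omega) (by omega) (by omega) x
    · simp only [dif_neg hg]
      exact List.Perm.refl _

-- phase-1 invariant of heapq._siftup
lemma sul_inv (s : Nat) (l0 : List Int) (hH : HeapFrom l0 (s + 1)) :
    ∀ p l, l.length = l0.length → p < l0.length → anc s p = true →
      (∀ q, ¬ (anc q p = true ∧ q ≠ p) → hget l q = hget l0 q) →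
      (∀ c, 0 < c → c < l0.length → s ≤ (c - 1) / 2 → (c - 1) / 2 ≠ p →
        hget l ((c - 1) / 2) ≤ hget l c) →
      ((siftupLoop l p l0.length).2 < l0.length ∧
       anc s (siftupLoop l p l0.length).2 = true ∧
       l0.length ≤ 2 * (siftupLoop l p l0.length).2 + 1 ∧
       (∀ q, ¬ (anc q (siftupLoop l p l0.length).2 = true ∧ q ≠ (siftupLoop l p l0.length).2) →
          hget (siftupLoop l p l0.length).1 q = hget l0 q) ∧
       (∀ c, 0 < c → c < l0.length → s ≤ (c - 1) / 2 → (c - 1) / 2 ≠ (siftupLoop l p l0.length).2 →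
          hget (siftupLoop l p l0.length).1 ((c - 1) / 2) ≤ hget (siftupLoop l p l0.length).1 c)) := by
  suffices key : ∀ n p l, l.length = l0.length → p < l0.length → l0.length - p ≤ n →
      anc s p = true →
      (∀ q, ¬ (anc q p = true ∧ q ≠ p) → hget l q = hget l0 q) →
      (∀ c, 0 < c → c < l0.length → s ≤ (c - 1) / 2 → (c - 1) / 2 ≠ p →
        hget l ((c - 1) / 2) ≤ hget l c) →
      ((siftupLoop l p l0.length).2 < l0.length ∧
       anc s (siftupLoop l p l0.length).2 = true ∧
       l0.length ≤ 2 * (siftupLoop l p l0.length).2 + 1 ∧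
       (∀ q, ¬ (anc q (siftupLoop l p l0.length).2 = true ∧ q ≠ (siftupLoop l p l0.length).2) →
          hget (siftupLoop l p l0.length).1 q = hget l0 q) ∧
       (∀ c, 0 < c → c < l0.length → s ≤ (c - 1) / 2 → (c - 1) / 2 ≠ (siftupLoop l p l0.length).2 →
          hget (siftupLoop l p l0.length).1 ((c - 1) / 2) ≤ hget (siftupLoop l p l0.length).1 c)) by
    intro p l hlen hp ha hd ha5
    exact key l0.length p l hlen hp (by omega) ha hd ha5
  intro n
  induction n with
  | zero => intro p l hlen hp hfuel ha hd ha5; omega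
  | succ n ih =>
    intro p l hlen hp hfuel ha hd ha5
    have hpl : p < l.length := by omega
    rw [siftupLoop]
    by_cases hg : 2 * p + 1 < l0.length
    · simp only [dif_pos hg]
      have step : ∀ cc, (cc = 2 * p + 1 ∨ cc = 2 * p + 2) → cc < l0.length →
          (∀ d, d < l0.length → (d = 2 * p + 1 ∨ d = 2 * p + 2) → hget l cc ≤ hget l d) →
          ((siftupLoop (l.set p (hget l cc)) cc l0.length).2 < l0.length ∧
           anc s (siftupLoop (l.set p (hget l cc)) cc l0.length).2 = true ∧
           l0.length ≤ 2 * (siftupLoop (l.set p (hget l cc)) cc l0.length).2 + 1 ∧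
           (∀ q, ¬ (anc q (siftupLoop (l.set p (hget l cc)) cc l0.length).2 = true ∧
              q ≠ (siftupLoop (l.set p (hget l cc)) cc l0.length).2) →
              hget (siftupLoop (l.set p (hget l cc)) cc l0.length).1 q = hget l0 q) ∧
           (∀ c, 0 < c → c < l0.length → s ≤ (c - 1) / 2 →
              (c - 1) / 2 ≠ (siftupLoop (l.set p (hget l cc)) cc l0.length).2 →
              hget (siftupLoop (l.set p (hget l cc)) cc l0.length).1 ((c - 1) / 2) ≤
                hget (siftupLoop (l.set p (hget l cc)) cc l0.length).1 c)) := by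
        intro cc hccf hcl hsel
        refine ih cc (l.set p (hget l cc)) (by simpa using hlen) hcl (by omega)
          (anc_child ha hccf) ?_ ?_
        · intro q hq
          by_cases hqp : q = p
          · exact absurd ⟨by rw [hqp]; exact anc_child (anc_self p) hccf, by omega⟩ hq
          · rw [hget_set_ne hqp]
            refine hd q (fun hqq => hq ⟨anc_child hqq.1 hccf, ?_⟩)
            have := anc_le hqq.1; omega
        · intro d h0 hdl hs hdp
          by_cases hpar : (d - 1) / 2 = p
          · rw [hpar, hget_set_self hpl, hget_set_ne (by omega : d ≠ p)]
            exact hsel d hdl (by omega)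
          · by_cases hdp2 : d = p
            · rw [hdp2] at h0 hdl hs hpar ⊢
              rw [hget_set_ne hpar, hget_set_self hpl]
              have e1 : hget l ((p - 1) / 2) ≤ hget l p := ha5 p h0 hdl hs hpar
              have e2 : hget l p = hget l0 p := hd p (fun hqq => hqq.2 rfl)
              have e3 : hget l cc = hget l0 cc :=
                hd cc (fun hqq => by have := anc_le hqq.1; omega)
              have e4 : hget l0 p ≤ hget l0 cc := by
                have hpcc : (cc - 1) / 2 = p := by omega
                have h5 := hH cc (by omega) hcl (by omega)
                rw [hpcc] at h5
                exact h5
              omega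
            · rw [hget_set_ne hpar, hget_set_ne hdp2]
              exact ha5 d h0 hdl hs hpar
      by_cases hcs : 2 * p + 2 < l0.length ∧ ¬ (hget l (2 * p + 1) < hget l (2 * p + 2))
      · simp only [if_pos hcs]
        refine step (2 * p + 2) (Or.inr rfl) hcs.1 ?_
        intro d hdl hdd
        rcases hdd with h | h
        · rw [h]; omega
        · rw [h]
      · simp only [if_neg hcs]
        refine step (2 * p + 1) (Or.inl rfl) hg ?_
        intro d hdl hdd
        rcases hdd with h | h
        · rw [h]
        · rw [h]
          have hb : hget l (2 * p + 1) < hget l (2 * p + 2) := by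
            by_contra hnb
            exact hcs ⟨by omega, hnb⟩
          omega
    · simp only [dif_neg hg]
      exact ⟨hp, ha, by omega, hd, ha5⟩

lemma siftup_correct (l : List Int) (s : Nat) (hs : s < l.length) (hH : HeapFrom l (s + 1)) :
    HeapFrom (siftup l s) s ∧ (siftup l s).Perm l := by
  obtain ⟨h1, h2, h3, h4, h5⟩ := sul_inv s l hH s l rfl hs (anc_self s)
    (fun q _ => rfl)
    (fun c h0 hc hsc hne => hH c h0 hc (by omega))
  have hLlen : (siftupLoop l s l.length).1.length = l.length := sul_len s l l.length
  have hplen : (siftupLoop l s l.length).2 < (siftupLoop l s l.length).1.length := by omega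
  have hx : hget ((siftupLoop l s l.length).1.set (siftupLoop l s l.length).2 (hget l s))
      (siftupLoop l s l.length).2 = hget l s := hget_set_self hplen
  simp only [siftup, siftdown, hx]
  constructor
  · refine sdl_heap s (hget l s) (siftupLoop l s l.length).2
      ((siftupLoop l s l.length).1.set (siftupLoop l s l.length).2 (hget l s))
      (by simpa using hplen) h2 ?_ ?_
    · intro c h0 hc hsc hcp
      have hc' : c < l.length := by simpa [hLlen] using hc
      rw [List.set_set]
      have hqne : (c - 1) / 2 ≠ (siftupLoop l s l.length).2 := by omega
      rw [hget_set_ne hqne, hget_set_ne hcp]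
      exact h5 c h0 hc' hsc hqne
    · intro hsp c hc hcc
      have hc' : c < l.length := by simpa [hLlen] using hc
      omega
  · refine (sdl_perm s (hget l s) (siftupLoop l s l.length).2 _ (by simpa using hplen)).trans ?_
    rw [List.set_set]
    exact (sul_perm (hget l s) s l l.length hs le_rfl).trans (by rw [set_hget_self hs])

lemma heapify_aux (n : Nat) : ∀ i (l' : List Int), l'.length = n → 2 * i ≤ n → HeapFrom l' i →
    HeapFrom ((List.range i).reverse.foldl (fun a j => siftup a j) l') 0 ∧
    ((List.range i).reverse.foldl (fun a j => siftup a j) l').Perm l' := by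
  intro i
  induction i with
  | zero => intro l' hlen hle hH; exact ⟨hH, List.Perm.refl _⟩
  | succ i ih =>
    intro l' hlen hle hH
    have hstep : (List.range (i + 1)).reverse = i :: (List.range i).reverse := by
      rw [List.range_succ, List.reverse_append]; rfl
    rw [hstep, List.foldl_cons]
    obtain ⟨hH2, hperm2⟩ := siftup_correct l' i (by omega) hH
    obtain ⟨hH3, hperm3⟩ := ih (siftup l' i) (by rw [hperm2.length_eq, hlen]) (by omega) hH2
    exact ⟨hH3, hperm3.trans hperm2⟩

lemma heapify_correct (l : List Int) : HeapFrom (heapify l) 0 ∧ (heapify l).Perm l := by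
  refine heapify_aux l.length (l.length / 2) l rfl (by omega) ?_
  intro c h0 hc hsc
  omega

lemma root_min {h : List Int} (hH : HeapFrom h 0) : ∀ q, q < h.length → hget h 0 ≤ hget h q := by
  intro q
  induction q using Nat.strong_induction_on with
  | _ q ih =>
    intro hq
    rcases Nat.eq_zero_or_pos q with h0 | h0
    · rw [h0]
    · exact le_trans (ih ((q - 1) / 2) (by omega) (by omega)) (hH q h0 hq (Nat.zero_le _))

lemma heappop_correct {h : List Int} (hne : h ≠ []) (hH : HeapFrom h 0) :
    (heappop h).1 = hget h 0 ∧ HeapFrom (heappop h).2 0 ∧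
    (↑(heappop h).2 : Multiset Int) + {hget h 0} = ↑h := by
  have hl : 0 < h.length := List.length_pos_iff.mpr hne
  rcases Nat.lt_or_ge h.length 2 with hlen2 | hlen2
  · -- singleton heap
    have h1 : h.length = 1 := by omega
    obtain ⟨a, ha⟩ := List.length_eq_one_iff.mp h1
    subst ha
    have hpop : heappop [a] = (a, []) := rfl
    rw [hpop]
    refine ⟨by simp [hget], fun c h0 hc hsc => by simp at hc, ?_⟩
    simp [hget]
  · -- at least two elements
    have hrl : h.dropLast.length = h.length - 1 := by simp
    have hbr : h.dropLast.length ≠ 0 := by omega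
    simp only [heappop, if_pos hbr]
    have hr0 : hget h.dropLast 0 = hget h 0 := hget_dropLast (by omega)
    refine ⟨hr0, ?_, ?_⟩
    · -- heap order restored by siftup
      refine (siftup_correct (h.dropLast.set 0 (hget h (h.length - 1))) 0
        (by rw [List.length_set, List.length_dropLast]; omega) ?_).1
      intro c h0 hc hsc
      have hc' : c < h.length - 1 := by
        rw [List.length_set] at hc; omega
      have hq1 : 1 ≤ (c - 1) / 2 := hsc
      rw [hget_set_ne (by omega : (c - 1) / 2 ≠ 0), hget_set_ne (by omega : c ≠ 0),
        hget_dropLast (by omega), hget_dropLast (by omega)]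
      exact hH c h0 (by omega) (Nat.zero_le _)
    · -- multiset accounting
      have hperm := (siftup_correct (h.dropLast.set 0 (hget h (h.length - 1))) 0
        (by rw [List.length_set, List.length_dropLast]; omega) ?_).2
      · rw [Multiset.coe_eq_coe.mpr hperm, hr0.symm]
        have hms := ms_set (l := h.dropLast) (i := 0) (by omega) (hget h (h.length - 1))
        rw [hms]
        have hsplit : h.dropLast ++ [h.getLast hne] = h := List.dropLast_concat_getLast hne
        have hlast : hget h (h.length - 1) = h.getLast hne := by
          rw [hget_eq_getElem (by omega), List.getLast_eq_getElem]
        rw [hlast]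
        calc (↑h.dropLast : Multiset Int) + {h.getLast hne}
            = ↑(h.dropLast ++ [h.getLast hne]) := by rw [← Multiset.coe_add]; rfl
          _ = ↑h := by rw [hsplit]
      · intro c h0 hc hsc
        have hc' : c < h.length - 1 := by
          rw [List.length_set] at hc; omega
        have hq1 : 1 ≤ (c - 1) / 2 := hsc
        rw [hget_set_ne (by omega : (c - 1) / 2 ≠ 0), hget_set_ne (by omega : c ≠ 0),
          hget_dropLast (by omega), hget_dropLast (by omega)]
        exact hH c h0 (by omega) (Nat.zero_le _)

lemma heappush_correct {h : List Int} (hH : HeapFrom h 0) (x : Int) :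
    HeapFrom (heappush h x) 0 ∧ (↑(heappush h x) : Multiset Int) = ↑h + {x} := by
  have hlen : (h ++ [x]).length = h.length + 1 := by simp
  have hps : (h ++ [x]).length - 1 = h.length := by omega
  have hxx : hget (h ++ [x]) h.length = x := hget_concat_self h x
  have hset : (h ++ [x]).set h.length x = h ++ [x] := by
    have h2 := set_hget_self (l := h ++ [x]) (i := h.length) (by rw [hlen]; omega)
    rw [hxx] at h2
    exact h2
  simp only [heappush, siftdown, hps, hxx]
  constructor
  · refine sdl_heap 0 x h.length (h ++ [x]) (by simp) (anc_zero _) ?_ ?_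
    · intro c h0 hc hsc hcp
      rw [hset]
      have hc' : c < h.length := by
        rw [hlen] at hc; omega
      have hq' : (c - 1) / 2 < h.length := by omega
      rw [hget_append_left hq', hget_append_left hc']
      exact hH c h0 hc' hsc
    · intro hsp c hc hcc
      rw [hlen] at hc
      omega
  · have hperm := sdl_perm 0 x h.length (h ++ [x]) (by simp)
    rw [hset] at hperm
    rw [Multiset.coe_eq_coe.mpr hperm, ← Multiset.coe_add]
    rfl

lemma loop_eq : ∀ fuel (h vals : List Int) (res : Int), HeapFrom h 0 →
    (↑h : Multiset Int) = ↑vals → (vals ≠ [] ∨ fuel = 0) →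
    loopA h res fuel = loopB vals res fuel := by
  intro fuel
  induction fuel with
  | zero => intro h vals res _ _ _; rfl
  | succ fuel ih =>
    intro h vals res hH hms hvne
    have hv : vals ≠ [] := by
      rcases hvne with hv | hv
      · exact hv
      · exact absurd hv (by omega)
    have hlen : h.length = vals.length := by
      have h2 := congrArg Multiset.card hms
      simpa using h2
    have hvl : 0 < vals.length := List.length_pos_iff.mpr hv
    have hhl : 0 < h.length := by omega
    have hhne : h ≠ [] := List.length_pos_iff.mp hhl
    cases hmin : PySem.List.min? vals (fun x => x) with
    | none =>
      exact absurd ((PySem.List.min?_eq_none_iff _ _).mp hmin) hv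
    | some m =>
      have hm_mem : m ∈ vals := PySem.List.min?_mem hmin
      have hm_min : ∀ y ∈ vals, m ≤ y := fun y hy => PySem.List.min?_isMin hmin y hy
      have h0v : hget h 0 ∈ vals := by
        have h2 : hget h 0 ∈ (↑h : Multiset Int) := Multiset.mem_coe.mpr (mem_of_hget hhl)
        rw [hms] at h2
        exact Multiset.mem_coe.mp h2
      have hm_h : m ∈ h := by
        have h2 : m ∈ (↑vals : Multiset Int) := Multiset.mem_coe.mpr hm_mem
        rw [← hms] at h2
        exact Multiset.mem_coe.mp h2
      have hm_eq : m = hget h 0 := by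
        refine le_antisymm (hm_min _ h0v) ?_
        obtain ⟨i, hi, hie⟩ := List.getElem_of_mem hm_h
        rw [← hie, ← hget_eq_getElem hi]
        exact root_min hH i hi
      obtain ⟨hp1, hp2, hp3⟩ := heappop_correct hhne hH
      have hsome : (PySem.List.index? vals m).isSome := (PySem.List.index?_isSome_iff _ _).mpr hm_mem
      obtain ⟨i, hidx⟩ := Option.isSome_iff_exists.mp hsome
      obtain ⟨hik, hvi, -⟩ := PySem.List.getElem_of_index?_eq_some hidx
      simp only [loopA, loopB, hmin, hidx, Option.getD_some]
      rw [hp1, ← hm_eq]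
      refine ih _ _ _ (heappush_correct hp2 (PySem.Int.floordiv m 3)).1 ?_ ?_
      · rw [(heappush_correct hp2 (PySem.Int.floordiv m 3)).2]
        have hms2 := ms_set hik (PySem.Int.floordiv m 3)
        rw [hget_eq_getElem hik, hvi] at hms2
        have hpop : (↑(heappop h).2 : Multiset Int) + {m} = ↑vals := by
          rw [hm_eq, hp3, hms]
        have hcan : (↑(heappop h).2 : Multiset Int) + {PySem.Int.floordiv m 3} + {m}
            = (↑(vals.set i (PySem.Int.floordiv m 3)) : Multiset Int) + {m} := by
          rw [hms2, ← hpop]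
          rw [add_assoc, add_assoc, add_comm ({m} : Multiset Int)]
        exact add_right_cancel hcan
      · left
        have h2 : (vals.set i (PySem.Int.floordiv m 3)).length = vals.length := by simp
        intro he
        rw [he] at h2
        simp at h2
        omega

-- ===== VERDICT (by name: the statement is the Claim_ definition above) =====
theorem maxKelements_spec : Claim_equal_maxKelements := by
  intro nums k _hdom hpre
  unfold Spec_maxKelements maxKelements maxKelements_alt
  obtain ⟨hH, hperm⟩ := heapify_correct (nums.map (fun v => -v))
  refine loop_eq _ _ _ _ hH (by exact_mod_cast Multiset.coe_eq_coe.mpr hperm) ?_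
  rcases hpre.2 with h | h
  · left; simpa using h
  · right; simp [h]
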